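-- pv_equiv track=rewrite | github.com/KETULPADARIYA/SpacyTutorials | Custom_tokenizer/CustomTokenizer.py | modify_str
-- ===== SOURCE A (Python) =====
-- def modify_str(raw_str: str) -> str:
--     """
--         Too remove specialize characters in raw_str
--     Args:
--         raw_str (str): text
--     """
--     symbols = {",", " ", r'/', "+", "_", "-", ".", "(", ")", '"', "'"}
--     characters = []
--     for character in raw_str:
--         if character.isalnum():
--             characters.append(character)
--         elif character in symbols:
--             characters.append(" " + character + " ")
--         elif character in {"\n"}:
--             characters.append(" ")
--     raw_str = "".join(characters)
--
--     return " ".join(raw_str.split())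
-- ===== SOURCE B (Python) =====
-- def modify_str(raw_str: str) -> str:
--     """Explicit one-pass tokenizer: buffer alnum runs, emit symbols as tokens,
--     treat space/newline as flush-only separators; no insert-spaces-then-split pass."""
--     token_symbols = {",", "/", "+", "_", "-", ".", "(", ")", '"', "'"}
--     tokens = []
--     buf = []
--     for c in raw_str:
--         if c.isalnum():
--             buf.append(c)
--         elif c in token_symbols:
--             if buf:
--                 tokens.append("".join(buf))
--                 buf = []
--             tokens.append(c)
--         elif c == " " or c == "\n":
--             if buf:
--                 tokens.append("".join(buf))
--                 buf = []
--         # any other character is simply dropped; it does not break a run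
--     if buf:
--         tokens.append("".join(buf))
--     return " ".join(tokens)
-- ===== Notes on version B (the rewrite author's own statement) =====
-- stated objective: simpler
-- what changed: B is a single-pass tokenizer with an alnum run buffer and a token list, emitting each symbol as its own token and treating space/newline as flush-only separators, instead of A's build-a-padded-string-then-split()/join whitespace-collapse pipeline.
import Mathlib
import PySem

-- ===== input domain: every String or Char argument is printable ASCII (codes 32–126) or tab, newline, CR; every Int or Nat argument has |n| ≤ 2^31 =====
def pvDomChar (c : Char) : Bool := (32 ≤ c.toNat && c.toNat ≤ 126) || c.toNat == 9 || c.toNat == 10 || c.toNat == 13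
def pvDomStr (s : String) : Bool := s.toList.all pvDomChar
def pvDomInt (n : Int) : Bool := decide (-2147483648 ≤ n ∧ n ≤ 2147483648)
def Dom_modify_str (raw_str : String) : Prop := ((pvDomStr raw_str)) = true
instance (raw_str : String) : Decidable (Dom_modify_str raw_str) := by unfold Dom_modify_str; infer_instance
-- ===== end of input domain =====

-- B replaces A's "pad symbols with spaces, then split()/join" collapse by a one-pass
-- tokenizer (alnum-run buffer + token list); objective: simpler, same O(n) cost.

-- ===== PORT A =====
-- the set literal `symbols`
def pvSymbolsA : PySem.Set Char :=
  PySem.Set.ofList [',', ' ', '/', '+', '_', '-', '.', '(', ')', '"', '\'']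

-- the body of A's `for character in raw_str` loop (appends to `characters`)
def pvLoopA (characters : List (List Char)) (character : Char) : List (List Char) :=
  if PySem.Chars.isalnum character then characters ++ [[character]]
  else if PySem.Set.contains pvSymbolsA character then
    characters ++ [[' '] ++ [character] ++ [' ']]
  else if PySem.Set.contains (PySem.Set.ofList ['\n']) character then characters ++ [[' ']]
  else characters

def modify_str (raw_str : String) : String :=
  let characters : List (List Char) := raw_str.toList.foldl pvLoopA []
  let joined : List Char := PySem.Chars.join [] characters      -- "".join(characters)
  String.mk (PySem.Chars.join [' '] (PySem.Chars.split₀ joined)) -- " ".join(joined.split())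

-- ===== PORT B =====
-- token_symbols = symbols - {' '}
def pvTokenSymbols : PySem.Set Char :=
  PySem.Set.ofList [',', '/', '+', '_', '-', '.', '(', ')', '"', '\'']

-- the body of B's loop: state is (buf, tokens)
def pvLoopB (st : List Char × List (List Char)) (c : Char) : List Char × List (List Char) :=
  if PySem.Chars.isalnum c then (st.1 ++ [c], st.2)
  else if PySem.Set.contains pvTokenSymbols c then
    ([], (if st.1.isEmpty then st.2 else st.2 ++ [st.1]) ++ [[c]])
  else if c = ' ' ∨ c = '\n' then
    ([], if st.1.isEmpty then st.2 else st.2 ++ [st.1])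
  else st  -- any other character is dropped and does not break a run

def modify_str_alt (raw_str : String) : String :=
  let st := raw_str.toList.foldl pvLoopB ([], [])
  let tokens := st.2 ++ (if st.1.isEmpty then [] else [st.1])   -- final flush
  String.mk (PySem.Chars.join [' '] tokens)                      -- " ".join(tokens)

-- ===== PRECONDITION & SPEC =====
def Spec_modify_str (raw_str : String) (out : String) : Prop := out = modify_str_alt raw_str
instance (raw_str : String) (out : String) : Decidable (Spec_modify_str raw_str out) := by unfold Spec_modify_str; infer_instance

-- ===== CLAIM (what is proved, stated in full; the proofs are below) =====
def Claim_equal_modify_str : Prop := ∀ (raw_str : String), Dom_modify_str raw_str → Spec_modify_str raw_str (modify_str raw_str)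

-- ===== LEMMAS AND PROOFS =====

-- what A's loop contributes to "".join(characters) for one input character
def pvExpand (c : Char) : List Char :=
  if PySem.Chars.isalnum c then [c]
  else if PySem.Set.contains pvSymbolsA c then [' '] ++ [c] ++ [' ']
  else if PySem.Set.contains (PySem.Set.ofList ['\n']) c then [' ']
  else []

lemma pv_join_nil_cons (b : List Char) (t : List (List Char)) :
    PySem.Chars.join [] (b :: t) = b ++ PySem.Chars.join [] t := by
  cases t
  · simp [PySem.Chars.join, List.intercalate]
  · rw [PySem.Chars.join_cons_cons]; simp

lemma pv_join_nil_flatten (ls : List (List Char)) : PySem.Chars.join [] ls = ls.flatten := by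
  induction ls with
  | nil => rfl
  | cons a t ih => rw [pv_join_nil_cons, ih, List.flatten_cons]

lemma pv_loopA_flatten (acc : List (List Char)) (c : Char) :
    (pvLoopA acc c).flatten = acc.flatten ++ pvExpand c := by
  unfold pvLoopA pvExpand
  split_ifs <;> simp

lemma pv_foldlA_flatten (s : List Char) : ∀ acc : List (List Char),
    (s.foldl pvLoopA acc).flatten = acc.flatten ++ s.flatMap pvExpand := by
  induction s with
  | nil => simp
  | cons c rest ih =>
    intro acc
    simp only [List.foldl_cons, List.flatMap_cons, ih, pv_loopA_flatten, List.append_assoc]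

-- unfolding equations for PySem.Chars.split₀.go (definitional)
lemma pv_go_nil_eq (cur : List Char) (acc : List (List Char)) :
    PySem.Chars.split₀.go [] cur acc =
      if cur.isEmpty then acc.reverse else (cur.reverse :: acc).reverse := rfl

lemma pv_go_cons_eq (c : Char) (rest cur : List Char) (acc : List (List Char)) :
    PySem.Chars.split₀.go (c :: rest) cur acc =
      if PySem.Chars.isspace c then
        (if cur.isEmpty then PySem.Chars.split₀.go rest [] acc
         else PySem.Chars.split₀.go rest [] (cur.reverse :: acc))
      else PySem.Chars.split₀.go rest (c :: cur) acc := rfl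

-- a space flushes the current word; a non-space extends it
lemma pv_go_flush (rest cur : List Char) (acc : List (List Char)) :
    PySem.Chars.split₀.go (' ' :: rest) cur acc =
      PySem.Chars.split₀.go rest [] (if cur.isEmpty then acc else cur.reverse :: acc) := by
  rw [pv_go_cons_eq]
  have : PySem.Chars.isspace ' ' = true := by decide
  rw [this]
  by_cases hc : cur.isEmpty <;> simp [hc]

lemma pv_go_word (c : Char) (rest cur : List Char) (acc : List (List Char))
    (h : PySem.Chars.isspace c = false) :
    PySem.Chars.split₀.go (c :: rest) cur acc = PySem.Chars.split₀.go rest (c :: cur) acc := by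
  rw [pv_go_cons_eq, h]; rfl

lemma pv_go_flush_empty (rest : List Char) (acc : List (List Char)) :
    PySem.Chars.split₀.go (' ' :: rest) [] acc = PySem.Chars.split₀.go rest [] acc := by
  rw [pv_go_flush]; simp

lemma pv_go_flush_nonempty (rest buf : List Char) (acc : List (List Char)) (hb : ¬ buf = []) :
    PySem.Chars.split₀.go (' ' :: rest) buf.reverse acc =
      PySem.Chars.split₀.go rest [] (buf :: acc) := by
  rw [pv_go_flush, if_neg (by simp [hb] : ¬ buf.reverse.isEmpty = true), List.reverse_reverse]

lemma pv_go_flush_word (rest : List Char) (c : Char) (acc : List (List Char))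
    (h : PySem.Chars.isspace c = false) :
    PySem.Chars.split₀.go (c :: ' ' :: rest) [] acc =
      PySem.Chars.split₀.go rest [] ([c] :: acc) := by
  rw [pv_go_word _ _ _ _ h, pv_go_flush]
  simp

-- character-class facts
lemma pv_alnum_not_space (c : Char) (h : PySem.Chars.isalnum c = true) :
    PySem.Chars.isspace c = false := by
  have e1 : 'A'.toNat = 65 := by decide
  have e2 : 'Z'.toNat = 90 := by decide
  have e3 : 'a'.toNat = 97 := by decide
  have e4 : 'z'.toNat = 122 := by decide
  have e5 : '0'.toNat = 48 := by decide
  have e6 : '9'.toNat = 57 := by decide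
  simp only [PySem.Chars.isalnum, PySem.Chars.isalpha, PySem.Chars.isdigit, PySem.Chars.isupper,
    PySem.Chars.islower, PySem.Chars.isspace, Char.le_def, UInt32.le_iff_toNat_le, Char.toNat,
    Bool.or_eq_true, Bool.and_eq_true, decide_eq_true_eq, Bool.or_eq_false_iff,
    Bool.and_eq_false_iff, decide_eq_false_iff_not] at *
  omega

lemma pv_tok_not_space (c : Char) (h : c ∈ pvTokenSymbols) : PySem.Chars.isspace c = false := by
  have : c ∈ [',', '/', '+', '_', '-', '.', '(', ')', '"', '\''] := by
    simpa [pvTokenSymbols, PySem.Set.mem_ofList] using h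
  fin_cases this <;> decide

lemma pv_sym_tok (c : Char) (h : c ∈ pvSymbolsA) (hne : ¬ c = ' ') : c ∈ pvTokenSymbols := by
  have : c ∈ [',', ' ', '/', '+', '_', '-', '.', '(', ')', '"', '\''] := by
    simpa [pvSymbolsA, PySem.Set.mem_ofList] using h
  fin_cases this <;> simp_all <;> decide

lemma pv_tok_sym (c : Char) (h : c ∈ pvTokenSymbols) : c ∈ pvSymbolsA := by
  have : c ∈ [',', '/', '+', '_', '-', '.', '(', ')', '"', '\''] := by
    simpa [pvTokenSymbols, PySem.Set.mem_ofList] using h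
  fin_cases this <;> decide

-- main invariant: running split₀.go over the expanded tail from mid-word state
-- (cur = reversed buffer, acc = reversed emitted tokens) is B's loop + final flush
lemma pv_main (s : List Char) : ∀ (buf : List Char) (toks : List (List Char)),
    PySem.Chars.split₀.go (s.flatMap pvExpand) buf.reverse toks.reverse =
      (fun st => st.2 ++ if st.1.isEmpty then [] else [st.1]) (s.foldl pvLoopB (buf, toks)) := by
  induction s with
  | nil =>
    intro buf toks
    simp only [List.flatMap_nil, pv_go_nil_eq, List.foldl_nil]
    by_cases hb : buf.isEmpty <;> simp [hb]
  | cons c rest ih =>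
    intro buf toks
    simp only [List.flatMap_cons, List.foldl_cons]
    by_cases h1 : PySem.Chars.isalnum c
    · -- alnum: extend the buffer
      rw [pvExpand, if_pos h1]
      simp only [List.cons_append, List.nil_append]
      rw [pv_go_word _ _ _ _ (pv_alnum_not_space c h1)]
      rw [show c :: buf.reverse = (buf ++ [c]).reverse by simp, ih (buf ++ [c]) toks]
      simp [pvLoopB, h1]
    · by_cases h2 : PySem.Set.contains pvSymbolsA c
      · have h2m : c ∈ pvSymbolsA := (PySem.Set.contains_iff _ _).mp h2
        by_cases hsp : c = ' '
        · -- the space symbol: three flushing spaces, no token emitted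
          subst hsp
          rw [pvExpand, if_neg h1, if_pos h2]
          simp only [List.cons_append, List.nil_append]
          have hns : (' ' ∈ pvTokenSymbols) = False := by simp [pvTokenSymbols]
          by_cases hb : buf = []
          · subst hb
            simp only [List.reverse_nil]
            rw [pv_go_flush_empty, pv_go_flush_empty, pv_go_flush_empty]
            have ihx := ih [] toks
            simp only [List.reverse_nil] at ihx
            rw [ihx]
            simp [pvLoopB, h1, hns]
          · rw [pv_go_flush_nonempty _ _ _ hb, pv_go_flush_empty, pv_go_flush_empty]
            rw [show buf :: toks.reverse = (toks ++ [buf]).reverse by simp]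
            have ihx := ih [] (toks ++ [buf])
            simp only [List.reverse_nil] at ihx
            rw [ihx]
            simp [pvLoopB, h1, hns, hb]
        · -- a non-space symbol: flush, then emit [c] as its own token
          have htok : c ∈ pvTokenSymbols := pv_sym_tok c h2m hsp
          have hcs : PySem.Chars.isspace c = false := pv_tok_not_space c htok
          rw [pvExpand, if_neg h1, if_pos h2]
          simp only [List.cons_append, List.nil_append]
          by_cases hb : buf = []
          · subst hb
            simp only [List.reverse_nil]
            rw [pv_go_flush_empty, pv_go_flush_word _ _ _ hcs]
            rw [show ([c] : List Char) :: toks.reverse = (toks ++ [[c]]).reverse by simp]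
            have ihx := ih [] (toks ++ [[c]])
            simp only [List.reverse_nil] at ihx
            rw [ihx]
            simp [pvLoopB, h1, htok]
          · rw [pv_go_flush_nonempty _ _ _ hb, pv_go_flush_word _ _ _ hcs]
            rw [show ([c] : List Char) :: buf :: toks.reverse
                  = (toks ++ [buf] ++ [[c]]).reverse by simp]
            have ihx := ih [] (toks ++ [buf] ++ [[c]])
            simp only [List.reverse_nil] at ihx
            rw [ihx]
            simp [pvLoopB, h1, htok, hb]
      · by_cases h3 : PySem.Set.contains (PySem.Set.ofList ['\n']) c
        · -- newline: one flushing space, no token emitted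
          have hcn : c = '\n' := by
            have := (PySem.Set.contains_iff _ _).mp h3
            simpa [PySem.Set.mem_ofList] using this
          subst hcn
          rw [pvExpand, if_neg h1, if_neg h2, if_pos h3]
          simp only [List.cons_append, List.nil_append]
          have hns : ('\n' ∈ pvTokenSymbols) = False := by simp [pvTokenSymbols]
          by_cases hb : buf = []
          · subst hb
            simp only [List.reverse_nil]
            rw [pv_go_flush_empty]
            have ihx := ih [] toks
            simp only [List.reverse_nil] at ihx
            rw [ihx]
            simp [pvLoopB, h1, hns]
          · rw [pv_go_flush_nonempty _ _ _ hb]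
            rw [show buf :: toks.reverse = (toks ++ [buf]).reverse by simp]
            have ihx := ih [] (toks ++ [buf])
            simp only [List.reverse_nil] at ihx
            rw [ihx]
            simp [pvLoopB, h1, hns, hb]
        · -- dropped character: both sides unchanged
          rw [pvExpand, if_neg h1, if_neg h2, if_neg h3]
          have hmem : c ∉ pvTokenSymbols := fun hx =>
            h2 ((PySem.Set.contains_iff _ _).mpr (pv_tok_sym c hx))
          have hne : ¬ (c = ' ' ∨ c = '\n') := by
            rintro (h | h) <;> subst h
            · exact h2 (by decide)
            · exact h3 (by decide)
          simp only [List.nil_append]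
          rw [ih buf toks]
          simp [pvLoopB, h1, hmem, hne]

-- ===== VERDICT (by name: the statement is the Claim_ definition above) =====
theorem modify_str_spec : Claim_equal_modify_str := by
  intro raw_str _
  unfold Spec_modify_str modify_str modify_str_alt
  simp only [PySem.Chars.split₀, pv_join_nil_flatten, pv_foldlA_flatten, List.flatten_nil,
    List.nil_append]
  have := pv_main raw_str.toList [] []
  simp only [List.reverse_nil] at this
  rw [this]
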